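-- pv_equiv track=rewrite | github.com/eliottcassidy2000/math | 04-computation/beta2_sc_connectivity.py | is_sc
-- ===== SOURCE A (Python) =====
-- def is_sc(A, n):
--     """Check if tournament A on n vertices is strongly connected."""
--     if n <= 1:
--         return True
--     # BFS forward from 0
--     visited = {0}
--     stack = [0]
--     while stack:
--         u = stack.pop()
--         for v in range(n):
--             if A[u][v] and v not in visited:
--                 visited.add(v)
--                 stack.append(v)
--     if len(visited) < n:
--         return False
--     # BFS backward from 0
--     visited = {0}
--     stack = [0]
--     while stack:
--         u = stack.pop()
--         for v in range(n):
--             if A[v][u] and v not in visited: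
--                 visited.add(v)
--                 stack.append(v)
--     return len(visited) == n
-- ===== SOURCE B (Python) =====
-- def is_sc(A, n):
--     """Check if tournament A on n vertices is strongly connected."""
--     if n <= 1:
--         return True
--
--     def closed(edge):
--         # grow the set reachable from 0 by repeated full sweeps until no change
--         vis = {0}
--         changed = True
--         while changed:
--             changed = False
--             for u in range(n):
--                 if u in vis:
--                     for v in range(n):
--                         if edge(u, v) and v not in vis:
--                             vis.add(v)
--                             changed = True
--         return len(vis) == n
--
--     return closed(lambda u, v: A[u][v]) and closed(lambda u, v: A[v][u])
-- ===== Notes on version B (the rewrite author's own statement) =====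
-- stated objective: alternative
-- what changed: The two explicit-stack DFS traversals are replaced by one shared fixpoint routine that repeatedly sweeps all vertices, growing the set reachable from 0 until a full sweep adds nothing, applied once to the edge relation and once to its transpose.
-- outside the precondition, e.g. on is_sc([[0, 0], [1]], 2): A returns False, B returns False
import Mathlib
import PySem

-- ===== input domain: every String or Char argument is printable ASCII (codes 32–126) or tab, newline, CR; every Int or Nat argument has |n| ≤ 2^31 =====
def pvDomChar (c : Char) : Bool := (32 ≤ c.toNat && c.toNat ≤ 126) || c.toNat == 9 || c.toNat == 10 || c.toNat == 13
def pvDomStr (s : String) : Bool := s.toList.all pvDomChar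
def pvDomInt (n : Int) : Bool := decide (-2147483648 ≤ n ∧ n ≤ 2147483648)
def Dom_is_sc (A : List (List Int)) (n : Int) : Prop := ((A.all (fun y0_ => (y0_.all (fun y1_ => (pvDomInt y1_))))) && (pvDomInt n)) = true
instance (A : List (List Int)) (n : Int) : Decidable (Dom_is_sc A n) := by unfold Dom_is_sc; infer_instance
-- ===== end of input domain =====

-- B replaces the two explicit-stack DFS traversals with one shared sweep-until-stable fixpoint
-- routine applied to the edge relation and its transpose (objective: alternative, not faster).

-- ===== PORT A =====
-- A[i][j] as a total accessor; exact wherever Pre_is_sc guarantees the indices are in range.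
def pvAt (A : List (List Int)) (i j : Int) : Int :=
  PySem.List.pyGetD (PySem.List.pyGetD A i []) j 0

-- number of vertices of range(n) not yet visited (termination measure for both loops)
def pvUnvis (n : Int) (vis : List Int) : Nat :=
  ((PySem.List.pyRange 0 n 1).filter (fun v => decide (v ∉ vis))).length

theorem pvUnvis_filter_aux (vis : List Int) (v : Int) :
    ∀ (l : List Int), l.Nodup → v ∈ l → v ∉ vis →
    (l.filter (fun x => decide (x ∉ vis ++ [v]))).length + 1 =
      (l.filter (fun x => decide (x ∉ vis))).length := by
  intro l
  induction l with
  | nil => simp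
  | cons a t ih =>
    intro hnd hm hnv
    have hnd' := (List.nodup_cons.1 hnd).2
    rcases List.mem_cons.1 hm with h | h
    · subst h
      have hvt : v ∉ t := (List.nodup_cons.1 hnd).1
      have heq : t.filter (fun x => decide (x ∉ vis ++ [v])) =
          t.filter (fun x => decide (x ∉ vis)) := by
        apply List.filter_congr
        intro x hx
        have hxv : x ≠ v := fun he => hvt (he ▸ hx)
        simp [List.mem_append, hxv]
      have c1 : (decide (v ∉ vis ++ [v])) = false := by simp
      have c2 : (decide (v ∉ vis)) = true := by simp [hnv]
      simp only [List.filter_cons, c1, c2, Bool.false_eq_true, if_false, if_true, heq,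
        List.length_cons]
    · by_cases hav : a = v
      · subst hav; exact absurd h (List.nodup_cons.1 hnd).1
      · have hih := ih hnd' h hnv
        have hc : (decide (a ∉ vis ++ [v])) = (decide (a ∉ vis)) := by
          simp [List.mem_append, hav]
        simp only [List.filter_cons, hc]
        split
        · simp only [List.length_cons]; omega
        · exact hih

theorem pvUnvis_append (n : Int) (vis : List Int) (v : Int)
    (hv : v ∈ PySem.List.pyRange 0 n 1) (hnv : v ∉ vis) :
    pvUnvis n (vis ++ [v]) + 1 = pvUnvis n vis :=
  pvUnvis_filter_aux vis v _ (PySem.List.nodup_pyRange_one 0 n) hv hnv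

-- one neighbour test 'if A[u][v] and v not in visited: visited.add(v); stack.append(v)'
def pvDfsPush (E : Int → Int → Int) (u : Int) (s : List Int × List Int) (v : Int) :
    List Int × List Int :=
  if E u v ≠ 0 ∧ v ∉ s.1 then (s.1 ++ [v], s.2 ++ [v]) else s

-- the inner 'for v in range(n)' of A's BFS loop
def pvDfsStep (E : Int → Int → Int) (n u : Int) (s : List Int × List Int) :
    List Int × List Int :=
  (PySem.List.pyRange 0 n 1).foldl (pvDfsPush E u) s

theorem pvDfsPush_measure_fold (E : Int → Int → Int) (u : Int) :
    ∀ (l : List Int) (s : List Int × List Int), (∀ v ∈ l, v ∈ PySem.List.pyRange 0 n 1) →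
    2 * pvUnvis n (l.foldl (pvDfsPush E u) s).1 + (l.foldl (pvDfsPush E u) s).2.length ≤
      2 * pvUnvis n s.1 + s.2.length := by
  intro l
  induction l with
  | nil => intro s _; simp
  | cons v t ih =>
    intro s hl
    have hih := ih (pvDfsPush E u s v) (fun x hx => hl x (List.mem_cons_of_mem v hx))
    have hstep : 2 * pvUnvis n (pvDfsPush E u s v).1 + (pvDfsPush E u s v).2.length ≤
        2 * pvUnvis n s.1 + s.2.length := by
      unfold pvDfsPush
      split
      · rename_i hc
        have := pvUnvis_append n s.1 v (hl v (List.mem_cons_self)) hc.2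
        simp only [List.length_append, List.length_cons, List.length_nil]
        omega
      · exact le_refl _
    calc 2 * pvUnvis n ((v :: t).foldl (pvDfsPush E u) s).1 +
          ((v :: t).foldl (pvDfsPush E u) s).2.length
        = 2 * pvUnvis n (t.foldl (pvDfsPush E u) (pvDfsPush E u s v)).1 +
          (t.foldl (pvDfsPush E u) (pvDfsPush E u s v)).2.length := by rw [List.foldl_cons]
      _ ≤ 2 * pvUnvis n (pvDfsPush E u s v).1 + (pvDfsPush E u s v).2.length := hih
      _ ≤ 2 * pvUnvis n s.1 + s.2.length := hstep

-- the 'while stack:' loop of A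
def pvDfsLoop (E : Int → Int → Int) (n : Int) (vis stk : List Int) : List Int :=
  if h : stk = [] then vis
  else
    let u := stk.getLast h
    let s := pvDfsStep E n u (vis, stk.dropLast)
    pvDfsLoop E n s.1 s.2
termination_by 2 * pvUnvis n vis + stk.length
decreasing_by
  have hm := pvDfsPush_measure_fold (n := n) E (stk.getLast h) (PySem.List.pyRange 0 n 1)
      (vis, stk.dropLast) (fun v hv => hv)
  have hlen : stk.dropLast.length + 1 = stk.length := by
    cases stk with
    | nil => exact absurd rfl h
    | cons a t => simp
  simp only [pvDfsStep] at *
  omega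

def is_sc (A : List (List Int)) (n : Int) : Bool :=
  if n ≤ 1 then true
  else
    let visF := pvDfsLoop (fun u v => pvAt A u v) n [0] [0]
    if (visF.length : Int) < n then false
    else
      let visB := pvDfsLoop (fun u v => pvAt A v u) n [0] [0]
      decide ((visB.length : Int) = n)

-- ===== PORT B =====
-- 'if edge(u, v) and v not in vis: vis.add(v); changed = True'
def pvSweepAdd (E : Int → Int → Int) (u : Int) (s : List Int × Bool) (v : Int) :
    List Int × Bool :=
  if E u v ≠ 0 ∧ v ∉ s.1 then (s.1 ++ [v], true) else s

-- the inner 'for v in range(n)' of one sweep over a visited u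
def pvSweepRow (E : Int → Int → Int) (n u : Int) (s : List Int × Bool) : List Int × Bool :=
  (PySem.List.pyRange 0 n 1).foldl (pvSweepAdd E u) s

-- one full sweep 'for u in range(n): if u in vis: …'
def pvSweepPass (E : Int → Int → Int) (n : Int) (s : List Int × Bool) : List Int × Bool :=
  (PySem.List.pyRange 0 n 1).foldl (fun s u => if u ∈ s.1 then pvSweepRow E n u s else s) s

-- state transition bound used only for termination: the visited set never shrinks,
-- and the changed flag can only be set by strictly enlarging it
def pvSR (n : Int) (s r : List Int × Bool) : Prop :=
  pvUnvis n r.1 ≤ pvUnvis n s.1 ∧ (r.2 = true → s.2 = true ∨ pvUnvis n r.1 < pvUnvis n s.1)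

theorem pvSR_refl (n : Int) (s : List Int × Bool) : pvSR n s s :=
  ⟨le_refl _, fun h => Or.inl h⟩

theorem pvSR_trans {n : Int} {a b c : List Int × Bool} (h1 : pvSR n a b) (h2 : pvSR n b c) :
    pvSR n a c := by
  refine ⟨le_trans h2.1 h1.1, fun hc => ?_⟩
  rcases h2.2 hc with hb | hlt
  · rcases h1.2 hb with ha | hlt'
    · exact Or.inl ha
    · exact Or.inr (lt_of_le_of_lt h2.1 hlt')
  · exact Or.inr (lt_of_lt_of_le hlt h1.1)

theorem pvFoldl_SR (n : Int) (f : (List Int × Bool) → Int → (List Int × Bool)) :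
    ∀ (l : List Int) (s : List Int × Bool), (∀ s' v, v ∈ l → pvSR n s' (f s' v)) →
    pvSR n s (l.foldl f s) := by
  intro l
  induction l with
  | nil => intro s _; exact pvSR_refl n s
  | cons v t ih =>
    intro s hstep
    rw [List.foldl_cons]
    exact pvSR_trans (hstep s v List.mem_cons_self)
      (ih (f s v) (fun s' w hw => hstep s' w (List.mem_cons_of_mem v hw)))

theorem pvSweepAdd_SR (E : Int → Int → Int) (n u : Int) (s : List Int × Bool) (v : Int)
    (hv : v ∈ PySem.List.pyRange 0 n 1) : pvSR n s (pvSweepAdd E u s v) := by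
  unfold pvSweepAdd
  split
  · rename_i hc
    have := pvUnvis_append n s.1 v hv hc.2
    exact ⟨by simp; omega, fun _ => Or.inr (by simp; omega)⟩
  · exact pvSR_refl n s

theorem pvSweepRow_SR (E : Int → Int → Int) (n u : Int) (s : List Int × Bool) :
    pvSR n s (pvSweepRow E n u s) :=
  pvFoldl_SR n _ _ s (fun s' v hv => pvSweepAdd_SR E n u s' v hv)

theorem pvSweepPass_SR (E : Int → Int → Int) (n : Int) (s : List Int × Bool) :
    pvSR n s (pvSweepPass E n s) := by
  apply pvFoldl_SR n _ _ s
  intro s' u _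
  dsimp only
  split
  · exact pvSweepRow_SR E n u s'
  · exact pvSR_refl n s'

-- the 'while changed:' loop of B's closed()
def pvSweepLoop (E : Int → Int → Int) (n : Int) (vis : List Int) : List Int :=
  let p := pvSweepPass E n (vis, false)
  if p.2 then pvSweepLoop E n p.1 else p.1
termination_by pvUnvis n vis
decreasing_by
  have hm := pvSweepPass_SR E n (vis, false)
  rcases hm with ⟨-, h2⟩
  have := h2 (by assumption)
  simp at this
  omega

-- B's helper closed(edge)
def pvClosed (E : Int → Int → Int) (n : Int) : Bool :=
  decide (((pvSweepLoop E n [0]).length : Int) = n)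

def is_sc_alt (A : List (List Int)) (n : Int) : Bool :=
  if n ≤ 1 then true
  else pvClosed (fun u v => pvAt A u v) n && pvClosed (fun u v => pvAt A v u) n

-- ===== PRECONDITION & SPEC =====
-- Pre_ excludes the inputs where Python indexes out of range (IndexError). It asks the first n
-- rows to each have length ≥ n, which also excludes a few inputs where the traversal happens not
-- to probe the short row and A still returns (see the cited example).
def Pre_is_sc (A : List (List Int)) (n : Int) : Prop :=
  1 < n → (n ≤ (A.length : Int) ∧ ∀ r ∈ A.take n.toNat, n ≤ (r.length : Int))
instance (A : List (List Int)) (n : Int) : Decidable (Pre_is_sc A n) := by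
  unfold Pre_is_sc; infer_instance

def pvWitness_is_sc : List (List Int) × Int := ([[0, 1], [1, 0]], 2)

def Spec_is_sc (A : List (List Int)) (n : Int) (out : Bool) : Prop := out = is_sc_alt A n
instance (A : List (List Int)) (n : Int) (out : Bool) : Decidable (Spec_is_sc A n out) := by
  unfold Spec_is_sc; infer_instance

-- ===== CLAIM (what is proved, stated in full; the proofs are below) =====
def Claim_equal_is_sc : Prop :=
  ∀ (A : List (List Int)) (n : Int), Dom_is_sc A n → Pre_is_sc A n → Spec_is_sc A n (is_sc A n)

-- ===== LEMMAS AND PROOFS =====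

-- vertices reachable from 0 inside range(n): the common characterisation of both visited sets
inductive pvRch (E : Int → Int → Int) (n : Int) : Int → Prop where
  | zero : pvRch E n 0
  | step {u v : Int} : pvRch E n u → 0 ≤ v → v < n → E u v ≠ 0 → pvRch E n v

theorem pvRch_bounds {E : Int → Int → Int} {n x : Int} (hn : 1 < n) (h : pvRch E n x) :
    0 ≤ x ∧ x < n := by
  induction h with
  | zero => omega
  | step _ h1 h2 _ _ => exact ⟨h1, h2⟩

-- invariant carried through the inner 'for v in range(n)' fold of A's loop
def pvDfsP (E : Int → Int → Int) (n u : Int) (vis stk : List Int) (l : List Int)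
    (r : List Int × List Int) : Prop :=
  r.1.Nodup ∧ (∀ x ∈ r.1, pvRch E n x) ∧ (∀ x ∈ r.2, x ∈ r.1) ∧
  (∀ x ∈ vis, x ∈ r.1) ∧ (∀ x ∈ stk, x ∈ r.2) ∧
  (∀ v ∈ l, E u v ≠ 0 → v ∈ r.1) ∧ (∀ x ∈ r.1, x ∈ vis ∨ x ∈ r.2)

theorem pvDfsStep_inv (E : Int → Int → Int) (n u : Int) (hu : pvRch E n u) :
    ∀ (l : List Int), (∀ v ∈ l, 0 ≤ v ∧ v < n) →
    ∀ (vis stk : List Int), vis.Nodup → (∀ x ∈ vis, pvRch E n x) → (∀ x ∈ stk, x ∈ vis) →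
    pvDfsP E n u vis stk l (l.foldl (pvDfsPush E u) (vis, stk)) := by
  intro l
  induction l with
  | nil =>
    intro _ vis stk hnd hr hsv
    exact ⟨hnd, hr, fun x hx => hsv x hx, fun x hx => hx, fun x hx => hx,
      fun v hv => absurd hv (List.not_mem_nil), fun x hx => Or.inl hx⟩
  | cons v t ih =>
    intro hl vis stk hnd hr hsv
    have hvb := hl v List.mem_cons_self
    have hl' : ∀ w ∈ t, 0 ≤ w ∧ w < n := fun w hw => hl w (List.mem_cons_of_mem v hw)
    rw [List.foldl_cons]
    by_cases hc : E u v ≠ 0 ∧ v ∉ vis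
    · have hpush : pvDfsPush E u (vis, stk) v = (vis ++ [v], stk ++ [v]) := by
        unfold pvDfsPush; rw [if_pos hc]
      have hnd' : (vis ++ [v]).Nodup := by
        simp [List.nodup_append, hnd]
        intro a ha he
        exact hc.2 (he ▸ ha)
      have hr' : ∀ x ∈ vis ++ [v], pvRch E n x := by
        intro x hx
        rcases List.mem_append.1 hx with h | h
        · exact hr x h
        · have : x = v := by simpa using h
          subst this
          exact pvRch.step hu hvb.1 hvb.2 hc.1
      have hsv' : ∀ x ∈ stk ++ [v], x ∈ vis ++ [v] := by
        intro x hx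
        rcases List.mem_append.1 hx with h | h
        · exact List.mem_append.2 (Or.inl (hsv x h))
        · exact List.mem_append.2 (Or.inr h)
      have hih := ih hl' (vis ++ [v]) (stk ++ [v]) hnd' hr' hsv'
      rw [hpush]
      obtain ⟨p1, p2, p3, p4, p5, p6, p7⟩ := hih
      refine ⟨p1, p2, p3, ?_, ?_, ?_, ?_⟩
      · exact fun x hx => p4 x (List.mem_append.2 (Or.inl hx))
      · exact fun x hx => p5 x (List.mem_append.2 (Or.inl hx))
      · intro w hw hne
        rcases List.mem_cons.1 hw with h | h
        · subst h
          exact p4 w (List.mem_append.2 (Or.inr List.mem_cons_self))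
        · exact p6 w h hne
      · intro x hx
        rcases p7 x hx with h | h
        · rcases List.mem_append.1 h with h' | h'
          · exact Or.inl h'
          · have : x = v := by simpa using h'
            subst this
            exact Or.inr (p5 x (List.mem_append.2 (Or.inr List.mem_cons_self)))
        · exact Or.inr h
    · have hpush : pvDfsPush E u (vis, stk) v = (vis, stk) := by
        unfold pvDfsPush; rw [if_neg hc]
      rw [hpush]
      have hih := ih hl' vis stk hnd hr hsv
      obtain ⟨p1, p2, p3, p4, p5, p6, p7⟩ := hih
      refine ⟨p1, p2, p3, p4, p5, ?_, p7⟩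
      intro w hw hne
      rcases List.mem_cons.1 hw with h | h
      · subst h
        have hvmem : w ∈ vis := by
          by_contra hwv
          exact hc ⟨hne, hwv⟩
        exact p4 w hvmem
      · exact p6 w h hne

theorem pvDfsLoop_inv (E : Int → Int → Int) (n : Int) :
    ∀ (vis stk : List Int), vis.Nodup → (∀ x ∈ vis, pvRch E n x) → (∀ x ∈ stk, x ∈ vis) →
    (∀ u ∈ vis, u ∈ stk ∨ ∀ v, 0 ≤ v → v < n → E u v ≠ 0 → v ∈ vis) →
    (pvDfsLoop E n vis stk).Nodup ∧ (∀ x ∈ vis, x ∈ pvDfsLoop E n vis stk) ∧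
    (∀ x ∈ pvDfsLoop E n vis stk, pvRch E n x) ∧
    (∀ u ∈ pvDfsLoop E n vis stk, ∀ v, 0 ≤ v → v < n → E u v ≠ 0 →
      v ∈ pvDfsLoop E n vis stk) := by
  intro vis stk
  induction vis, stk using pvDfsLoop.induct E n with
  | case1 vis =>
    intro hnd hr _ hcl
    rw [pvDfsLoop]
    refine ⟨hnd, fun x hx => hx, hr, ?_⟩
    intro u hu v h1 h2 h3
    rcases hcl u hu with h | h
    · exact absurd h (List.not_mem_nil)
    · exact h v h1 h2 h3
  | case2 vis stk h u s ih =>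
    intro hnd hr hsv hcl
    have hue : u = stk.getLast h := rfl
    have hum : u ∈ vis := hsv u (hue ▸ List.getLast_mem h)
    have hstep := pvDfsStep_inv E n u (hr u hum) (PySem.List.pyRange 0 n 1)
      (fun v hv => by
        have := (PySem.List.mem_pyRange_one).1 hv
        omega)
      vis stk.dropLast hnd hr (fun x hx => hsv x (List.mem_of_mem_dropLast hx))
    have hse : s = (PySem.List.pyRange 0 n 1).foldl (pvDfsPush E u) (vis, stk.dropLast) := rfl
    rw [← hse] at hstep
    obtain ⟨p1, p2, p3, p4, p5, p6, p7⟩ := hstep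
    have hcl' : ∀ w ∈ s.1, w ∈ s.2 ∨ ∀ v, 0 ≤ v → v < n → E w v ≠ 0 → v ∈ s.1 := by
      intro w hw
      rcases p7 w hw with hwv | hws
      · rcases hcl w hwv with hstk | hclosed
        · have hsplit : stk = stk.dropLast ++ [stk.getLast h] := (List.dropLast_append_getLast h).symm
          rw [hsplit] at hstk
          rcases List.mem_append.1 hstk with hd | hl2
          · exact Or.inl (p5 w hd)
          · have : w = u := by rw [hue]; simpa using hl2
            subst this
            refine Or.inr (fun v h1 h2 h3 => p6 v ?_ h3)
            exact (PySem.List.mem_pyRange_one).2 ⟨h1, h2⟩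
        · exact Or.inr (fun v h1 h2 h3 => p4 v (hclosed v h1 h2 h3))
      · exact Or.inl hws
    have hih := ih p1 p2 p3 hcl'
    obtain ⟨q1, q2, q3, q4⟩ := hih
    have hrun : pvDfsLoop E n vis stk = pvDfsLoop E n s.1 s.2 := by
      rw [pvDfsLoop]
      simp only [dif_neg h]
      rfl
    rw [hrun]
    exact ⟨q1, fun x hx => q2 x (p4 x hx), q3, q4⟩

theorem pvDfs_char (E : Int → Int → Int) (n : Int) :
    (pvDfsLoop E n [0] [0]).Nodup ∧ ∀ x, (x ∈ pvDfsLoop E n [0] [0] ↔ pvRch E n x) := by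
  have h := pvDfsLoop_inv E n [0] [0] (by simp)
    (by intro x hx; simp at hx; subst hx; exact pvRch.zero)
    (fun x hx => hx)
    (by intro u hu; exact Or.inl hu)
  obtain ⟨h1, h2, h3, h4⟩ := h
  refine ⟨h1, fun x => ⟨h3 x, ?_⟩⟩
  intro hr
  induction hr with
  | zero => exact h2 0 (by simp)
  | step hu hv1 hv2 hne ih => exact h4 _ ih _ hv1 hv2 hne

-- monotone invariant through the inner fold of one sweep
theorem pvSweepRow_inv (E : Int → Int → Int) (n u : Int) (hu : pvRch E n u) :
    ∀ (l : List Int), (∀ v ∈ l, 0 ≤ v ∧ v < n) →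
    ∀ (vis : List Int) (c : Bool), vis.Nodup → (∀ x ∈ vis, pvRch E n x) →
    (l.foldl (pvSweepAdd E u) (vis, c)).1.Nodup ∧
    (∀ x ∈ (l.foldl (pvSweepAdd E u) (vis, c)).1, pvRch E n x) ∧
    (∀ x ∈ vis, x ∈ (l.foldl (pvSweepAdd E u) (vis, c)).1) := by
  intro l
  induction l with
  | nil => intro _ vis c hnd hr; exact ⟨hnd, hr, fun x hx => hx⟩
  | cons v t ih =>
    intro hl vis c hnd hr
    have hvb := hl v List.mem_cons_self
    have hl' : ∀ w ∈ t, 0 ≤ w ∧ w < n := fun w hw => hl w (List.mem_cons_of_mem v hw)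
    rw [List.foldl_cons]
    by_cases hc : E u v ≠ 0 ∧ v ∉ vis
    · have hadd : pvSweepAdd E u (vis, c) v = (vis ++ [v], true) := by
        unfold pvSweepAdd; rw [if_pos hc]
      rw [hadd]
      have hnd' : (vis ++ [v]).Nodup := by
        simp [List.nodup_append, hnd]
        intro a ha he
        exact hc.2 (he ▸ ha)
      have hr' : ∀ x ∈ vis ++ [v], pvRch E n x := by
        intro x hx
        rcases List.mem_append.1 hx with hx | hx
        · exact hr x hx
        · have : x = v := by simpa using hx
          subst this
          exact pvRch.step hu hvb.1 hvb.2 hc.1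
      obtain ⟨q1, q2, q3⟩ := ih hl' (vis ++ [v]) true hnd' hr'
      exact ⟨q1, q2, fun x hx => q3 x (List.mem_append.2 (Or.inl hx))⟩
    · have hadd : pvSweepAdd E u (vis, c) v = (vis, c) := by
        unfold pvSweepAdd; rw [if_neg hc]
      rw [hadd]
      exact ih hl' vis c hnd hr

-- monotone invariant through one full sweep
theorem pvSweepPass_inv (E : Int → Int → Int) (n : Int) :
    ∀ (l : List Int),
    ∀ (vis : List Int) (c : Bool), vis.Nodup → (∀ x ∈ vis, pvRch E n x) →
    (l.foldl (fun s u => if u ∈ s.1 then pvSweepRow E n u s else s) (vis, c)).1.Nodup ∧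
    (∀ x ∈ (l.foldl (fun s u => if u ∈ s.1 then pvSweepRow E n u s else s) (vis, c)).1,
      pvRch E n x) ∧
    (∀ x ∈ vis, x ∈ (l.foldl (fun s u => if u ∈ s.1 then pvSweepRow E n u s else s) (vis, c)).1)
    := by
  intro l
  induction l with
  | nil => intro vis c hnd hr; exact ⟨hnd, hr, fun x hx => hx⟩
  | cons u t ih =>
    intro vis c hnd hr
    rw [List.foldl_cons]
    by_cases hu : u ∈ (vis, c).1
    · rw [if_pos hu]
      have hru : pvRch E n u := hr u hu
      have hrow := pvSweepRow_inv E n u hru (PySem.List.pyRange 0 n 1)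
        (fun v hv => by
          have := (PySem.List.mem_pyRange_one).1 hv
          omega)
        vis c hnd hr
      obtain ⟨r1, r2, r3⟩ := hrow
      have hrw : pvSweepRow E n u (vis, c) =
          ((pvSweepRow E n u (vis, c)).1, (pvSweepRow E n u (vis, c)).2) := rfl
      rw [hrw]
      obtain ⟨q1, q2, q3⟩ := ih (pvSweepRow E n u (vis, c)).1 (pvSweepRow E n u (vis, c)).2 r1 r2
      exact ⟨q1, q2, fun x hx => q3 x (r3 x hx)⟩
    · rw [if_neg hu]
      exact ih vis c hnd hr

theorem pvSweepAdd_flag (E : Int → Int → Int) (u : Int) (s : List Int × Bool) (v : Int)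
    (h : (pvSweepAdd E u s v).2 = false) :
    pvSweepAdd E u s v = s ∧ (E u v ≠ 0 → v ∈ s.1) := by
  by_cases hc : E u v ≠ 0 ∧ v ∉ s.1
  · exfalso
    unfold pvSweepAdd at h
    rw [if_pos hc] at h
    simp at h
  · refine ⟨by unfold pvSweepAdd; rw [if_neg hc], fun hne => ?_⟩
    by_contra hv
    exact hc ⟨hne, hv⟩

theorem pvSweepRow_flag (E : Int → Int → Int) (u : Int) :
    ∀ (l : List Int) (s : List Int × Bool), (l.foldl (pvSweepAdd E u) s).2 = false →
    l.foldl (pvSweepAdd E u) s = s ∧ ∀ v ∈ l, E u v ≠ 0 → v ∈ s.1 := by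
  intro l
  induction l with
  | nil => intro s _; exact ⟨rfl, by simp⟩
  | cons v t ih =>
    intro s h
    rw [List.foldl_cons] at h ⊢
    obtain ⟨he, hprops⟩ := ih (pvSweepAdd E u s v) h
    rw [he] at h
    obtain ⟨he2, hv⟩ := pvSweepAdd_flag E u s v h
    refine ⟨by rw [he, he2], ?_⟩
    intro w hw hne
    rcases List.mem_cons.1 hw with hw | hw
    · subst hw; exact hv hne
    · have := hprops w hw hne
      rwa [he2] at this

theorem pvSweepPass_flag (E : Int → Int → Int) (n : Int) :
    ∀ (l : List Int) (s : List Int × Bool),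
    (l.foldl (fun s u => if u ∈ s.1 then pvSweepRow E n u s else s) s).2 = false →
    l.foldl (fun s u => if u ∈ s.1 then pvSweepRow E n u s else s) s = s ∧
    ∀ u ∈ l, u ∈ s.1 → ∀ v ∈ PySem.List.pyRange 0 n 1, E u v ≠ 0 → v ∈ s.1 := by
  intro l
  induction l with
  | nil => intro s _; exact ⟨rfl, by simp⟩
  | cons u t ih =>
    intro s h
    rw [List.foldl_cons] at h ⊢
    obtain ⟨he, hprops⟩ := ih (if u ∈ s.1 then pvSweepRow E n u s else s) h
    rw [he] at h
    by_cases hu : u ∈ s.1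
    · rw [if_pos hu] at h he hprops ⊢
      have h' : ((PySem.List.pyRange 0 n 1).foldl (pvSweepAdd E u) s).2 = false := h
      obtain ⟨he2, hrow⟩ := pvSweepRow_flag E u (PySem.List.pyRange 0 n 1) s h'
      have hgs : pvSweepRow E n u s = s := he2
      refine ⟨by rw [he, hgs], ?_⟩
      intro w hw hws v hv hne
      rcases List.mem_cons.1 hw with hw | hw
      · subst hw; exact hrow v hv hne
      · have := hprops w hw (by rw [hgs]; exact hws) v hv hne
        rwa [hgs] at this
    · rw [if_neg hu] at h he hprops ⊢
      refine ⟨he, ?_⟩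
      intro w hw hws v hv hne
      rcases List.mem_cons.1 hw with hw | hw
      · subst hw; exact absurd hws hu
      · exact hprops w hw hws v hv hne

theorem pvSweepLoop_inv (E : Int → Int → Int) (n : Int) :
    ∀ (vis : List Int), vis.Nodup → (∀ x ∈ vis, pvRch E n x) →
    (pvSweepLoop E n vis).Nodup ∧ (∀ x ∈ vis, x ∈ pvSweepLoop E n vis) ∧
    (∀ x ∈ pvSweepLoop E n vis, pvRch E n x) ∧
    (∀ u ∈ pvSweepLoop E n vis, 0 ≤ u → u < n →
      ∀ v, 0 ≤ v → v < n → E u v ≠ 0 → v ∈ pvSweepLoop E n vis) := by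
  intro vis
  induction vis using pvSweepLoop.induct E n with
  | case1 vis p hp ih =>
    intro hnd hr
    have hpass := pvSweepPass_inv E n (PySem.List.pyRange 0 n 1) vis false hnd hr
    obtain ⟨r1, r2, r3⟩ := hpass
    have hp' : (pvSweepPass E n (vis, false)).2 = true := hp
    have hrun : pvSweepLoop E n vis = pvSweepLoop E n (pvSweepPass E n (vis, false)).1 := by
      rw [pvSweepLoop]
      simp only [hp', if_true]
    obtain ⟨q1, q2, q3, q4⟩ := ih r1 r2
    rw [hrun]
    exact ⟨q1, fun x hx => q2 x (r3 x hx), q3, q4⟩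
  | case2 vis p hp =>
    intro hnd hr
    have hp2 : (pvSweepPass E n (vis, false)).2 = false := by
      have : ¬ (pvSweepPass E n (vis, false)).2 = true := hp
      simpa using this
    obtain ⟨he, hclosed⟩ := pvSweepPass_flag E n (PySem.List.pyRange 0 n 1) (vis, false) hp2
    have hrun : pvSweepLoop E n vis = (pvSweepPass E n (vis, false)).1 := by
      rw [pvSweepLoop]
      simp only [hp2, Bool.false_eq_true, if_false]
    have hp1 : (pvSweepPass E n (vis, false)).1 = vis := by
      rw [show pvSweepPass E n (vis, false) = (vis, false) from he]
    rw [hrun, hp1]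
    refine ⟨hnd, fun x hx => hx, hr, ?_⟩
    intro u hu hu1 hu2 v h1 h2 h3
    have humem : u ∈ PySem.List.pyRange 0 n 1 := (PySem.List.mem_pyRange_one).2 ⟨hu1, hu2⟩
    exact hclosed u humem hu v ((PySem.List.mem_pyRange_one).2 ⟨h1, h2⟩) h3

theorem pvSweep_char (E : Int → Int → Int) (n : Int) (hn : 1 < n) :
    (pvSweepLoop E n [0]).Nodup ∧ ∀ x, (x ∈ pvSweepLoop E n [0] ↔ pvRch E n x) := by
  have h := pvSweepLoop_inv E n [0] (by simp)
    (by intro x hx; simp at hx; subst hx; exact pvRch.zero)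
  obtain ⟨h1, h2, h3, h4⟩ := h
  refine ⟨h1, fun x => ⟨h3 x, ?_⟩⟩
  intro hr
  induction hr with
  | zero => exact h2 0 (by simp)
  | step hu hv1 hv2 hne ih =>
    rename_i u v
    have hub := pvRch_bounds hn hu
    exact h4 u ih hub.1 hub.2 v hv1 hv2 hne

theorem pvLen_eq (E : Int → Int → Int) (n : Int) (hn : 1 < n) :
    (pvDfsLoop E n [0] [0]).length = (pvSweepLoop E n [0]).length := by
  obtain ⟨h1, h2⟩ := pvDfs_char E n
  obtain ⟨h3, h4⟩ := pvSweep_char E n hn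
  exact ((List.perm_ext_iff_of_nodup h1 h3).2 (fun x => (h2 x).trans (h4 x).symm)).length_eq

theorem pvLen_le (E : Int → Int → Int) (n : Int) (hn : 1 < n) :
    ((pvDfsLoop E n [0] [0]).length : Int) ≤ n := by
  obtain ⟨hnd, hmem⟩ := pvDfs_char E n
  have hsub : pvDfsLoop E n [0] [0] ⊆ PySem.List.pyRange 0 n 1 := by
    intro x hx
    have hb := pvRch_bounds hn ((hmem x).1 hx)
    exact (PySem.List.mem_pyRange_one).2 ⟨hb.1, hb.2⟩
  have hle := (List.subperm_of_subset hnd hsub).length_le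
  rw [PySem.List.length_pyRange_one] at hle
  omega

-- ===== VERDICT (by name: the statement is the Claim_ definition above) =====
theorem is_sc_spec : Claim_equal_is_sc := by
  intro A n _hdom _hpre
  unfold Spec_is_sc
  by_cases hn : n ≤ 1
  · simp [is_sc, is_sc_alt, hn]
  · have hn' : 1 < n := by omega
    simp only [is_sc, is_sc_alt, pvClosed, hn, if_false]
    rw [pvLen_eq (fun u v => pvAt A u v) n hn', pvLen_eq (fun u v => pvAt A v u) n hn']
    have hle := pvLen_le (fun u v => pvAt A u v) n hn'
    rw [pvLen_eq (fun u v => pvAt A u v) n hn'] at hle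
    by_cases hlt : ((pvSweepLoop (fun u v => pvAt A u v) n [0]).length : Int) < n
    · simp [hlt]
      intro h
      exact absurd h (by omega)
    · simp [(by omega : ((pvSweepLoop (fun u v => pvAt A u v) n [0]).length : Int) = n)]
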